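-- pv_equiv track=rewrite | github.com/luizaugustoliveira/Algoritmos | Laço - While/filtra_mais_pares_solucao/solucao.py | linhas_filtradas
-- ===== SOURCE A (Python) =====
-- def conta_par(seq):
--     pares = 0
--     for i in range(len(seq)):
--         if seq[i] % 2 == 0:
--             pares += 1
--     return pares
--
-- def conta_impar(seq):
--     impares = 0
--     for i in range(len(seq)):
--         if seq[i] % 2 == 1:
--             impares += 1
--     return impares
--
-- def linhas_filtradas(seq):
--     linhas = []
--     for i in range(len(seq)):
--         impares = conta_impar(seq[i])
--         pares = conta_par(seq[i])
--         if pares > impares: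
--             linhas.append(seq[i])
--     return linhas
-- ===== SOURCE B (Python) =====
-- def linhas_filtradas(seq):
--     linhas = []
--     for linha in seq:
--         delta = 0
--         for x in linha:
--             if x % 2 == 0:
--                 delta += 1
--             elif x % 2 == 1:
--                 delta -= 1
--         if delta > 0:
--             linhas.append(linha)
--     return linhas
-- ===== Notes on version B (the rewrite author's own statement) =====
-- stated objective: simpler
-- what changed: Single function with no helpers: one fused pass per row maintaining the evens-minus-odds difference delta, instead of two separate index-loop counting helpers per row.
import Mathlib
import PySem

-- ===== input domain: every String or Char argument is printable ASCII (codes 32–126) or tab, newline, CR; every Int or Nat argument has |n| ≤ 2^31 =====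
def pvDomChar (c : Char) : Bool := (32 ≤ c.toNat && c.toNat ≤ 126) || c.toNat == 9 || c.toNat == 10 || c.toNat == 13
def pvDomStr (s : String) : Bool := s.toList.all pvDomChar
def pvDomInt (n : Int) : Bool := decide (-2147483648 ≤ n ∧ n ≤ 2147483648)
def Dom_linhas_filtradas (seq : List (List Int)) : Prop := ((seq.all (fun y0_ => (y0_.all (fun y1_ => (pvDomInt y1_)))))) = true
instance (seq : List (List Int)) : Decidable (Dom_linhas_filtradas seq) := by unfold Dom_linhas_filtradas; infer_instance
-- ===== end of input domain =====

-- B fuses A's two per-row counting helpers into one single-pass evens-minus-odds delta (objective: simpler); return values proved equal.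

-- ===== PORT A =====
-- conta_par: count elements with x % 2 == 0
def conta_par (seq : List Int) : Int :=
  seq.foldl (fun pares x => if PySem.Int.mod x 2 = 0 then pares + 1 else pares) 0

-- conta_impar: count elements with x % 2 == 1
def conta_impar (seq : List Int) : Int :=
  seq.foldl (fun impares x => if PySem.Int.mod x 2 = 1 then impares + 1 else impares) 0

def linhas_filtradas (seq : List (List Int)) : List (List Int) :=
  seq.foldl (fun linhas row =>
    if conta_par row > conta_impar row then linhas ++ [row] else linhas) []

-- ===== PORT B =====
-- delta is the running evens-minus-odds difference of the row (Python's local variable, inlined)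
def linhas_filtradas_alt (seq : List (List Int)) : List (List Int) :=
  seq.foldl (fun linhas row =>
    if (row.foldl (fun (d : Int) (x : Int) =>
      if PySem.Int.mod x 2 = 0 then d + 1
      else if PySem.Int.mod x 2 = 1 then d - 1
      else d) (0 : Int)) > 0
    then linhas ++ [row] else linhas) []

-- ===== PRECONDITION & SPEC =====
def Spec_linhas_filtradas (seq : List (List Int)) (out : List (List Int)) : Prop := out = linhas_filtradas_alt seq
instance (seq : List (List Int)) (out : List (List Int)) : Decidable (Spec_linhas_filtradas seq out) := by unfold Spec_linhas_filtradas; infer_instance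

-- ===== CLAIM (what is proved, stated in full; the proofs are below) =====
def Claim_equal_linhas_filtradas : Prop := ∀ (seq : List (List Int)), Dom_linhas_filtradas seq → Spec_linhas_filtradas seq (linhas_filtradas seq)

-- ===== LEMMAS AND PROOFS =====

-- a +1/-1 delta fold over disjoint predicates equals the difference of the two counting folds
theorem count_delta (p q : Int → Prop) [DecidablePred p] [DecidablePred q]
    (hpq : ∀ x, ¬ (p x ∧ q x)) :
    ∀ (l : List Int) (d a b : Int),
      l.foldl (fun d x => if p x then d + 1 else if q x then d - 1 else d) d
      = d + (l.foldl (fun a x => if p x then a + 1 else a) a - a)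
          - (l.foldl (fun b x => if q x then b + 1 else b) b - b) := by
  intro l
  induction l with
  | nil => intro d a b; simp
  | cons x xs ih =>
    intro d a b
    simp only [List.foldl]
    by_cases hp : p x
    · simp only [if_pos hp, if_neg (fun hq => hpq x ⟨hp, hq⟩)]
      have := ih (d + 1) (a + 1) b
      omega
    · simp only [if_neg hp]
      by_cases hq : q x
      · simp only [if_pos hq]
        have := ih (d - 1) a (b + 1)
        omega
      · simp only [if_neg hq]
        have := ih d a b
        omega

-- filtering folds with equivalent conditions build the same list
theorem foldl_filter_ext {α : Type} (P Q : α → Prop) [DecidablePred P] [DecidablePred Q]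
    (h : ∀ a, P a ↔ Q a) :
    ∀ (l : List α) (acc : List α),
      l.foldl (fun s a => if P a then s ++ [a] else s) acc
      = l.foldl (fun s a => if Q a then s ++ [a] else s) acc := by
  intro l
  induction l with
  | nil => intro acc; rfl
  | cons a l ih =>
    intro acc
    simp only [List.foldl]
    by_cases hP : P a
    · rw [if_pos hP, if_pos ((h a).mp hP), ih]
    · rw [if_neg hP, if_neg (fun hQ => hP ((h a).mpr hQ)), ih]

-- per-row condition bridge: pares > impares  ↔  delta > 0
theorem row_iff (row : List Int) :
    conta_par row > conta_impar row ↔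
    (row.foldl (fun (d : Int) (x : Int) =>
      if PySem.Int.mod x 2 = 0 then d + 1
      else if PySem.Int.mod x 2 = 1 then d - 1
      else d) (0 : Int)) > 0 := by
  have h := count_delta (fun x => PySem.Int.mod x 2 = 0) (fun x => PySem.Int.mod x 2 = 1)
    (fun x hx => by
      have h0 : PySem.Int.mod x 2 = 0 := hx.1
      have h1 : PySem.Int.mod x 2 = 1 := hx.2
      rw [h0] at h1
      exact absurd h1 (by decide)) row 0 0 0
  simp only [] at h
  unfold conta_par conta_impar
  simp only [gt_iff_lt]
  omega

-- ===== VERDICT (by name: the statement is the Claim_ definition above) =====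
theorem linhas_filtradas_spec : Claim_equal_linhas_filtradas := by
  intro seq _
  unfold Spec_linhas_filtradas linhas_filtradas linhas_filtradas_alt
  exact foldl_filter_ext
    (fun row => conta_par row > conta_impar row)
    (fun row => (row.foldl (fun (d : Int) (x : Int) =>
      if PySem.Int.mod x 2 = 0 then d + 1
      else if PySem.Int.mod x 2 = 1 then d - 1
      else d) (0 : Int)) > 0)
    row_iff seq []
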